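-- pv_equiv track=rewrite | github.com/khcho226/MyPractice | 프로그래머스/lv2/17679. ［1차］ 프렌즈4블록/［1차］ 프렌즈4블록.py | solution
-- ===== SOURCE A (Python) =====
-- import copy
--
-- def solution(m, n, board):
--     board = [list(x) for x in board]
--
--     while True:
--         arr = copy.deepcopy(board)
--         check = True
--
--         for i in range(m - 1):
--             for j in range(n - 1):
--                 if arr[i][j] != 0 and arr[i][j] == arr[i + 1][j] == arr[i][j + 1] == arr[i + 1][j + 1]:
--                     board[i][j] = board[i + 1][j] = board[i][j + 1] = board[i + 1][j + 1] = 0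
--                     check = False
--
--         if check:
--             num = 0
--
--             for i in board:
--                 num += i.count(0)
--
--             return num
--
--         else:
--             for i in range(m - 1):
--                 for j in range(n):
--                     if board[m - i - 2][j] != 0 and board[m - i - 1][j] == 0:
--                         num = -1
--
--                         while True:
--                             num += 1
--
--                             if num >= i + 1 or board[m - i - 1 + num][j] != 0:
--                                 break
--
--                         board[m - i - 2 + num][j] = board[m - i - 2][j]
--                         board[m - i - 2][j] = 0
-- ===== SOURCE B (Python) =====
-- def solution(m, n, board):
--     # Simpler: collect 2x2 corners into a list, clear them, and rebuild each
--     # column (zeros on top, non-zeros settled at the bottom) -- no deepcopy,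
--     # no manual cell-sliding loop.
--     grid = [list(row) for row in board]
--     while True:
--         corners = [(i, j)
--                    for i in range(m - 1) for j in range(n - 1)
--                    if grid[i][j] != 0
--                    and grid[i][j] == grid[i + 1][j] == grid[i][j + 1] == grid[i + 1][j + 1]]
--         if not corners:
--             return sum(row.count(0) for row in grid)
--         for i, j in corners:
--             grid[i][j] = grid[i + 1][j] = grid[i][j + 1] = grid[i + 1][j + 1] = 0
--         for j in range(n):
--             col = [grid[i][j] for i in range(m)]
--             vals = [v for v in col if v != 0]
--             col2 = [0] * (m - len(vals)) + vals
--             for i in range(m):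
--                 grid[i][j] = col2[i]
-- ===== Notes on version B (the rewrite author's own statement) =====
-- stated objective: simpler
-- what changed: B replaces A's deepcopy-snapshot marking with a collected list of 2x2 corner coordinates and replaces A's manual bottom-up cell-sliding gravity (nested loops with an inner while) with an independent per-column rebuild that keeps the non-zero entries in order below a block of zeros.
-- outside the precondition, e.g. on solution(3, 6, ['AACBBB', 'CBBBBBA', 'ACAAA']): A returns 6, B raises IndexError
import Mathlib
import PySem

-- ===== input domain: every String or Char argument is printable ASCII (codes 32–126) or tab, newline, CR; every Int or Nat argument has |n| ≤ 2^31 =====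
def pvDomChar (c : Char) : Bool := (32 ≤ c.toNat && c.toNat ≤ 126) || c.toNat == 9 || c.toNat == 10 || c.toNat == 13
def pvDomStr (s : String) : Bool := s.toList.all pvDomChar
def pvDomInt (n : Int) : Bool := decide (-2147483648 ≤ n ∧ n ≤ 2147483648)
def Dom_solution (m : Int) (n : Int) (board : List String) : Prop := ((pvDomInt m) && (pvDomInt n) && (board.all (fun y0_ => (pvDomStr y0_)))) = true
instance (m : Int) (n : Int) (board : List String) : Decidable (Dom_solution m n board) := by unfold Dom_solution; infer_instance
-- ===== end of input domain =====

-- B replaces A's deepcopy-snapshot marking by a corner list and A's manual cell-sliding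
-- gravity by a per-column rebuild (zeros on top); objective: simpler (return value only;
-- A mutates no caller-visible data).
-- Cells are encoded as Int: a character c becomes its code (always > 0 on Dom), a cleared
-- cell becomes 0, matching Python where a char never equals the int 0.

-- ===== PORT A =====
def pvGet (g : List (List Int)) (i j : Nat) : Int := (g.getD i []).getD j 0
def pvSet (g : List (List Int)) (i j : Nat) (v : Int) : List (List Int) := g.set i ((g.getD i []).set j v)

-- the inner `while True: num += 1; if num >= i+1 or board[m-i-1+num][j] != 0: break`
def pvNumA (g : List (List Int)) (j base lim num : Nat) : Nat :=
  if lim ≤ num ∨ pvGet g (base + num) j ≠ 0 then num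
  else pvNumA g j base lim (num + 1)
termination_by lim - num
decreasing_by omega

-- chained assignment `board[i][j] = board[i+1][j] = board[i][j+1] = board[i+1][j+1] = 0`
def pvZero4 (g : List (List Int)) (i j : Nat) : List (List Int) :=
  pvSet (pvSet (pvSet (pvSet g i j 0) (i+1) j 0) i (j+1) 0) (i+1) (j+1) 0

-- the marking double loop, reading the snapshot `arr` (= the grid at round start)
def pvMarkA (M N : Nat) (g0 : List (List Int)) : List (List Int) × Bool :=
  (List.range (M-1)).foldl (fun st i =>
    (List.range (N-1)).foldl (fun st j =>
      if (pvGet g0 i j != 0) && (pvGet g0 i j == pvGet g0 (i+1) j)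
          && (pvGet g0 (i+1) j == pvGet g0 i (j+1)) && (pvGet g0 i (j+1) == pvGet g0 (i+1) (j+1))
      then (pvZero4 st.1 i j, false) else st) st) (g0, true)

-- the gravity double loop with the sliding inner while
def pvGravA (M N : Nat) (g : List (List Int)) : List (List Int) :=
  (List.range (M-1)).foldl (fun g i =>
    (List.range N).foldl (fun g j =>
      if (pvGet g (M-i-2) j != 0) && (pvGet g (M-i-1) j == 0) then
        let num := pvNumA g j (M-i-1) (i+1) 0
        pvSet (pvSet g (M-i-2+num) j (pvGet g (M-i-2) j)) (M-i-2) j 0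
      else g) g) g

def pvCount (g : List (List Int)) : Int :=
  g.foldl (fun acc row => acc + (row.count 0 : Int)) 0

-- the outer `while True`; fuel m*n+1 is a totality guard only: each non-returning
-- round strictly decreases the number of non-zero cells in the m×n region
def pvLoopA (M N : Nat) : Nat → List (List Int) → Int
  | 0, _ => 0
  | fuel+1, g =>
    let st := pvMarkA M N g
    if st.2 then pvCount st.1 else pvLoopA M N fuel (pvGravA M N st.1)

def pvToGrid (board : List String) : List (List Int) :=
  board.map (fun s => s.toList.map (fun c => (c.toNat : Int)))

def solution (m : Int) (n : Int) (board : List String) : Int :=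
  pvLoopA m.toNat n.toNat (m.toNat * n.toNat + 1) (pvToGrid board)

-- ===== PORT B =====
-- list of top-left corners of monochrome 2x2 blocks (a comprehension)
def pvCorners (M N : Nat) (g : List (List Int)) : List (Nat × Nat) :=
  (List.range (M-1)).flatMap (fun i => (List.range (N-1)).filterMap (fun j =>
    if (pvGet g i j != 0) && (pvGet g i j == pvGet g (i+1) j)
        && (pvGet g (i+1) j == pvGet g i (j+1)) && (pvGet g i (j+1) == pvGet g (i+1) (j+1))
    then some (i, j) else none))

def pvClear (g : List (List Int)) (cs : List (Nat × Nat)) : List (List Int) :=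
  cs.foldl (fun g c => pvZero4 g c.1 c.2) g

-- per-column gravity: keep the non-zeros in order, zeros on top
def pvSettle (M N : Nat) (g : List (List Int)) : List (List Int) :=
  (List.range N).foldl (fun g j =>
    let col := (List.range M).map (fun i => pvGet g i j)
    let vals := col.filter (fun v => v != 0)
    let col2 := List.replicate (M - vals.length) 0 ++ vals
    (List.range M).foldl (fun g i => pvSet g i j (col2.getD i 0)) g) g

def pvLoopB (M N : Nat) : Nat → List (List Int) → Int
  | 0, _ => 0
  | fuel+1, g =>
    let cs := pvCorners M N g
    if cs.isEmpty then pvCount g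
    else pvLoopB M N fuel (pvSettle M N (pvClear g cs))

def solution_alt (m : Int) (n : Int) (board : List String) : Int :=
  pvLoopB m.toNat n.toNat (m.toNat * n.toNat + 1)
    (board.map (fun s => s.toList.map (fun c => (c.toNat : Int))))

-- ===== PRECONDITION & SPEC =====
-- Pre_ excludes ragged/undersized boards (fewer than m rows or a row of the first m
-- shorter than n while m,n ≥ 2): there A's survival depends on the dynamic short-circuit
-- order of its chained comparisons and it may raise IndexError.
def Pre_solution (m : Int) (n : Int) (board : List String) : Prop :=
  2 ≤ m → 2 ≤ n →
    (m ≤ (board.length : Int) ∧ ∀ s ∈ board.take m.toNat, n ≤ (s.length : Int))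
instance (m : Int) (n : Int) (board : List String) : Decidable (Pre_solution m n board) := by
  unfold Pre_solution; infer_instance

def pvWitness_solution : Int × Int × List String := (2, 2, ["aa", "aa"])

def Spec_solution (m : Int) (n : Int) (board : List String) (out : Int) : Prop := out = solution_alt m n board
instance (m : Int) (n : Int) (board : List String) (out : Int) : Decidable (Spec_solution m n board out) := by unfold Spec_solution; infer_instance

-- ===== CLAIM (what is proved, stated in full; the proofs are below) =====
def Claim_equal_solution : Prop := ∀ (m : Int) (n : Int) (board : List String), Dom_solution m n board → Pre_solution m n board → Spec_solution m n board (solution m n board)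

-- ===== LEMMAS AND PROOFS =====

-- proof-side helpers: grids compared by dimensions + pointwise cells; columns as lists

def pvDims (g g' : List (List Int)) : Prop :=
  g'.length = g.length ∧ ∀ x, (g'.getD x []).length = (g.getD x []).length

def pvShape (M N : Nat) (g : List (List Int)) : Prop :=
  M ≤ g.length ∧ ∀ i, i < M → N ≤ (g.getD i []).length

def pvColOf (M : Nat) (g : List (List Int)) (j : Nat) : List Int :=
  (List.range M).map (fun i => pvGet g i j)

def pvFilterNZ (c : List Int) : List Int := c.filter (fun v => v != 0)

def pvSettleCol (c : List Int) : List Int :=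
  List.replicate (c.length - (pvFilterNZ c).length) 0 ++ pvFilterNZ c

def pvNumC (c : List Int) (base lim num : Nat) : Nat :=
  if lim ≤ num ∨ c.getD (base + num) 0 ≠ 0 then num
  else pvNumC c base lim (num + 1)
termination_by lim - num
decreasing_by omega

def pvCStep (M i : Nat) (c : List Int) : List Int :=
  if (c.getD (M-i-2) 0 != 0) && (c.getD (M-i-1) 0 == 0) then
    (c.set (M-i-2 + pvNumC c (M-i-1) (i+1) 0) (c.getD (M-i-2) 0)).set (M-i-2) 0
  else c

-- basic cell lemmas

theorem pvGetD_set {α : Type} (l : List α) (i x : Nat) (a d : α) :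
    (l.set i a).getD x d = if x = i ∧ i < l.length then a else l.getD x d := by
  simp only [List.getD, List.getElem?_set]
  split
  · rename_i hix
    subst hix
    by_cases h : i < l.length <;> simp [h]
  · rename_i hix
    rw [if_neg (fun hc : x = i ∧ i < l.length => hix hc.1.symm)]

theorem pvSet_length (g : List (List Int)) (i j : Nat) (v : Int) :
    (pvSet g i j v).length = g.length := by
  simp [pvSet]

theorem pvSet_rowlen (g : List (List Int)) (i j : Nat) (v : Int) (x : Nat) :
    ((pvSet g i j v).getD x []).length = (g.getD x []).length := by
  rw [pvSet, pvGetD_set]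
  split
  · rename_i h
    obtain ⟨rfl, _⟩ := h
    simp
  · rfl

theorem pvGet_pvSet (g : List (List Int)) (i j : Nat) (v : Int) (x y : Nat) :
    pvGet (pvSet g i j v) x y =
      if x = i ∧ y = j ∧ i < g.length ∧ j < (g.getD i []).length then v
      else pvGet g x y := by
  rw [pvGet, pvSet, pvGetD_set]
  by_cases hx : x = i
  · subst hx
    by_cases hg : x < g.length
    · rw [if_pos ⟨rfl, hg⟩, pvGetD_set]
      by_cases hy : y = j
      · subst hy
        by_cases hj : y < (g.getD x []).length
        · simp [hj, hg, pvGet]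
        · simp [hj, hg, pvGet]
      · simp [hy, pvGet]
    · simp [hg, pvGet]
  · simp [hx, pvGet]

theorem pvDims_refl (g : List (List Int)) : pvDims g g := ⟨rfl, fun _ => rfl⟩

theorem pvDims_trans {g1 g2 g3 : List (List Int)} (h1 : pvDims g1 g2) (h2 : pvDims g2 g3) :
    pvDims g1 g3 := ⟨h2.1.trans h1.1, fun x => (h2.2 x).trans (h1.2 x)⟩

theorem pvDims_set (g : List (List Int)) (i j : Nat) (v : Int) : pvDims g (pvSet g i j v) :=
  ⟨pvSet_length g i j v, fun x => pvSet_rowlen g i j v x⟩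

theorem pvDims_zero4 (g : List (List Int)) (i j : Nat) : pvDims g (pvZero4 g i j) := by
  unfold pvZero4
  exact pvDims_trans (pvDims_trans (pvDims_trans (pvDims_set _ _ _ _) (pvDims_set _ _ _ _))
    (pvDims_set _ _ _ _)) (pvDims_set _ _ _ _)

theorem pvShape_of_dims {M N : Nat} {g g' : List (List Int)}
    (hs : pvShape M N g) (hd : pvDims g g') : pvShape M N g' := by
  refine ⟨hd.1 ▸ hs.1, fun i hi => ?_⟩
  rw [hd.2 i]; exact hs.2 i hi

theorem pvGrid_ext {g g' : List (List Int)} (hd : pvDims g g')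
    (h : ∀ x y, pvGet g' x y = pvGet g x y) : g' = g := by
  apply List.ext_getElem (by exact hd.1)
  intro x hx1 hx2
  have hg' : g'.getD x [] = g'[x] := List.getD_eq_getElem g' [] hx1
  have hg : g.getD x [] = g[x] := List.getD_eq_getElem g [] hx2
  apply List.ext_getElem
  · have := hd.2 x; rw [hg', hg] at this; exact this
  · intro y hy1 hy2
    have := h x y
    rw [pvGet, pvGet, hg', hg] at this
    rwa [List.getD_eq_getElem _ _ hy1, List.getD_eq_getElem _ _ hy2] at this

-- marking: A's flag/zeroing double fold equals B's corner list

theorem pvFoldl_if_filter {α β : Type} (L : List α) (p : α → Bool) (f : β → α → β)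
    (st : β × Bool) :
    L.foldl (fun (st : β × Bool) x => if p x then (f st.1 x, false) else st) st
      = ((L.filter p).foldl f st.1, st.2 && (L.filter p).isEmpty) := by
  induction L generalizing st with
  | nil => simp
  | cons x L ih =>
    by_cases hp : p x <;> simp [List.foldl_cons, hp, List.filter_cons, ih]

theorem pvFoldl_pair {α β : Type} (I : List α) (F : α → β → β) (cflag : α → Bool)
    (g : β) (b : Bool) :
    I.foldl (fun (st : β × Bool) i => (F i st.1, st.2 && cflag i)) (g, b)
      = (I.foldl (fun g i => F i g) g, b && I.all cflag) := by
  induction I generalizing g b with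
  | nil => simp
  | cons i I ih => simp [List.foldl_cons, ih, Bool.and_assoc]

theorem pvFilterMap_if {α β : Type} (J : List α) (p : α → Bool) (f : α → β) :
    J.filterMap (fun j => if p j then some (f j) else none)
      = (J.filter p).map f := by
  induction J with
  | nil => simp
  | cons j J ih => by_cases hp : p j <;> simp [List.filterMap_cons, hp, List.filter_cons, ih]

theorem pvIsEmpty_append {α : Type} (l r : List α) :
    (l ++ r).isEmpty = (l.isEmpty && r.isEmpty) := by
  cases l <;> simp

theorem pvIsEmpty_map {α β : Type} (f : α → β) (l : List α) :
    (l.map f).isEmpty = l.isEmpty := by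
  cases l <;> simp

theorem pvMarkA_eq (M N : Nat) (g : List (List Int)) :
    pvMarkA M N g = (pvClear g (pvCorners M N g), (pvCorners M N g).isEmpty) := by
  unfold pvMarkA pvCorners pvClear
  have hinner : ∀ (i : Nat) (st : List (List Int) × Bool),
      (List.range (N-1)).foldl (fun st j =>
        if (pvGet g i j != 0) && (pvGet g i j == pvGet g (i+1) j)
            && (pvGet g (i+1) j == pvGet g i (j+1)) && (pvGet g i (j+1) == pvGet g (i+1) (j+1))
        then (pvZero4 st.1 i j, false) else st) st
      = (((List.range (N-1)).filter (fun j =>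
            (pvGet g i j != 0) && (pvGet g i j == pvGet g (i+1) j)
            && (pvGet g (i+1) j == pvGet g i (j+1)) && (pvGet g i (j+1) == pvGet g (i+1) (j+1)))).foldl
            (fun g' j => pvZero4 g' i j) st.1,
         st.2 && ((List.range (N-1)).filter (fun j =>
            (pvGet g i j != 0) && (pvGet g i j == pvGet g (i+1) j)
            && (pvGet g (i+1) j == pvGet g i (j+1)) && (pvGet g i (j+1) == pvGet g (i+1) (j+1)))).isEmpty) :=
    fun i st => pvFoldl_if_filter (List.range (N-1)) _ (fun g' j => pvZero4 g' i j) st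
  simp only [hinner]
  have houter := pvFoldl_pair (List.range (M-1))
      (fun i g' => ((List.range (N-1)).filter (fun j =>
            (pvGet g i j != 0) && (pvGet g i j == pvGet g (i+1) j)
            && (pvGet g (i+1) j == pvGet g i (j+1)) && (pvGet g i (j+1) == pvGet g (i+1) (j+1)))).foldl
            (fun g' j => pvZero4 g' i j) g')
      (fun i => ((List.range (N-1)).filter (fun j =>
            (pvGet g i j != 0) && (pvGet g i j == pvGet g (i+1) j)
            && (pvGet g (i+1) j == pvGet g i (j+1)) && (pvGet g i (j+1) == pvGet g (i+1) (j+1)))).isEmpty)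
      g true
  rw [houter]
  simp only [pvFilterMap_if]
  rw [Prod.mk.injEq]
  refine ⟨?_, ?_⟩
  · rw [List.foldl_flatMap]
    simp only [List.foldl_map]
  · rw [Bool.true_and]
    induction List.range (M-1) with
    | nil => simp
    | cons i I ih =>
      rw [List.flatMap_cons, List.all_cons, pvIsEmpty_append, pvIsEmpty_map]
      rw [ih]

theorem pvDims_clear (g : List (List Int)) (cs : List (Nat × Nat)) :
    pvDims g (pvClear g cs) := by
  induction cs generalizing g with
  | nil => exact pvDims_refl g
  | cons c cs ih => exact pvDims_trans (pvDims_zero4 g c.1 c.2) (ih _)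

theorem pvCorners_nonempty {M N : Nat} {g : List (List Int)}
    (h : ¬ (pvCorners M N g).isEmpty = true) : 2 ≤ M ∧ 2 ≤ N := by
  rw [List.isEmpty_iff] at h
  obtain ⟨c, hc⟩ := List.exists_mem_of_ne_nil _ h
  rw [pvCorners, List.mem_flatMap] at hc
  obtain ⟨i, hi, hc⟩ := hc
  obtain ⟨j, hj, _⟩ := List.mem_filterMap.mp hc
  rw [List.mem_range] at hi hj
  omega

-- number-loop lemmas

theorem pvNumA_eq_pvNumC (g : List (List Int)) (j base lim : Nat) (c : List Int)
    (h : ∀ μ, μ < lim → pvGet g (base + μ) j = c.getD (base + μ) 0) :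
    ∀ ν, pvNumA g j base lim ν = pvNumC c base lim ν := by
  suffices hk : ∀ k ν, lim - ν ≤ k → pvNumA g j base lim ν = pvNumC c base lim ν by
    intro ν; exact hk (lim - ν) ν le_rfl
  intro k
  induction k with
  | zero =>
    intro ν hν
    rw [pvNumA, pvNumC]
    have : lim ≤ ν := by omega
    simp [this]
  | succ k ih =>
    intro ν hν
    rw [pvNumA, pvNumC]
    by_cases hl : lim ≤ ν
    · simp [hl]
    · have hlt : ν < lim := by omega
      rw [h ν hlt]
      split
      · rfl
      · exact ih (ν + 1) (by omega)

theorem pvNumC_le (c : List Int) (base lim : Nat) :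
    ∀ ν, ν ≤ lim → pvNumC c base lim ν ≤ lim := by
  suffices hk : ∀ k ν, lim - ν ≤ k → ν ≤ lim → pvNumC c base lim ν ≤ lim by
    intro ν hν; exact hk (lim - ν) ν le_rfl hν
  intro k
  induction k with
  | zero =>
    intro ν h1 h2
    rw [pvNumC]
    have : lim ≤ ν := by omega
    simp [this]; omega
  | succ k ih =>
    intro ν h1 h2
    rw [pvNumC]
    split
    · exact h2
    · rename_i hcond
      exact ih (ν + 1) (by omega) (by omega)

theorem pvNumC_first (c : List Int) (base lim t : Nat)
    (ht : lim ≤ t ∨ c.getD (base + t) 0 ≠ 0)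
    (hlt : ∀ μ, μ < t → μ < lim ∧ c.getD (base + μ) 0 = 0) :
    pvNumC c base lim 0 = t := by
  suffices hk : ∀ k ν, t - ν ≤ k → ν ≤ t → pvNumC c base lim ν = t by
    exact hk t 0 (by omega) (by omega)
  intro k
  induction k with
  | zero =>
    intro ν h1 h2
    have hνt : ν = t := by omega
    subst hνt
    rw [pvNumC, if_pos ht]
  | succ k ih =>
    intro ν h1 h2
    rcases Nat.eq_or_lt_of_le h2 with heq | hv
    · subst heq; rw [pvNumC, if_pos ht]
    · obtain ⟨ha, hb⟩ := hlt ν hv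
      rw [pvNumC]
      have hneg : ¬(lim ≤ ν ∨ c.getD (base + ν) 0 ≠ 0) := by
        push_neg
        exact ⟨by omega, by simpa using hb⟩
      rw [if_neg hneg]
      exact ih (ν + 1) (by omega) (by omega)

-- write-a-column fold (B's write-back; also the shape of A's single writes)

theorem pvWriteCol_char (g : List (List Int)) (j K : Nat) (c : List Int)
    (hK : K ≤ g.length) (hrow : ∀ x, x < K → j < (g.getD x []).length) :
    pvDims g ((List.range K).foldl (fun g i => pvSet g i j (c.getD i 0)) g) ∧
    ∀ x y, pvGet ((List.range K).foldl (fun g i => pvSet g i j (c.getD i 0)) g) x y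
      = if x < K ∧ y = j then c.getD x 0 else pvGet g x y := by
  induction K with
  | zero =>
    refine ⟨pvDims_refl g, fun x y => ?_⟩
    simp
  | succ K ih =>
    obtain ⟨ihd, ihg⟩ := ih (by omega) (fun x hx => hrow x (by omega))
    rw [List.range_succ, List.foldl_append, List.foldl_cons, List.foldl_nil]
    set G := (List.range K).foldl (fun g i => pvSet g i j (c.getD i 0)) g with hG
    have hKlen : K < G.length := by rw [ihd.1]; omega
    have hjlen : j < (G.getD K []).length := by rw [ihd.2]; exact hrow K (by omega)
    refine ⟨pvDims_trans ihd (pvDims_set G K j (c.getD K 0)), fun x y => ?_⟩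
    rw [pvGet_pvSet]
    by_cases hx : x = K ∧ y = j
    · rw [if_pos ⟨hx.1, hx.2, hKlen, hjlen⟩, hx.1, if_pos ⟨by omega, hx.2⟩]
    · have : ¬(x = K ∧ y = j ∧ K < G.length ∧ j < (G.getD K []).length) := by tauto
      rw [if_neg this, ihg x y]
      by_cases h1 : x < K ∧ y = j
      · rw [if_pos h1, if_pos ⟨by omega, h1.2⟩]
      · have : ¬(x < K + 1 ∧ y = j) := by
          rintro ⟨ha, hb⟩
          rcases Nat.lt_or_ge x K with h | h
          · exact h1 ⟨h, hb⟩
          · exact hx ⟨by omega, hb⟩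
        rw [if_neg h1, if_neg this]

-- B's gravity: per-column settle characterization

theorem pvSettle_char (M N : Nat) (g : List (List Int)) (hs : pvShape M N g) :
    pvDims g (pvSettle M N g) ∧
    ∀ x y, pvGet (pvSettle M N g) x y
      = if x < M ∧ y < N then (pvSettleCol (pvColOf M g y)).getD x 0 else pvGet g x y := by
  have main : ∀ t, t ≤ N →
      pvDims g ((List.range t).foldl (fun g j =>
        let col := (List.range M).map (fun i => pvGet g i j)
        let vals := col.filter (fun v => v != 0)
        let col2 := List.replicate (M - vals.length) 0 ++ vals
        (List.range M).foldl (fun g i => pvSet g i j (col2.getD i 0)) g) g) ∧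
      ∀ x y, pvGet ((List.range t).foldl (fun g j =>
        let col := (List.range M).map (fun i => pvGet g i j)
        let vals := col.filter (fun v => v != 0)
        let col2 := List.replicate (M - vals.length) 0 ++ vals
        (List.range M).foldl (fun g i => pvSet g i j (col2.getD i 0)) g) g) x y
        = if x < M ∧ y < t then (pvSettleCol (pvColOf M g y)).getD x 0 else pvGet g x y := by
    intro t
    induction t with
    | zero => exact fun _ => ⟨pvDims_refl g, fun x y => by simp⟩
    | succ t ih =>
      intro ht
      obtain ⟨ihd, ihg⟩ := ih (by omega)
      rw [List.range_succ, List.foldl_append, List.foldl_cons, List.foldl_nil]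
      set G := (List.range t).foldl (fun g j =>
        let col := (List.range M).map (fun i => pvGet g i j)
        let vals := col.filter (fun v => v != 0)
        let col2 := List.replicate (M - vals.length) 0 ++ vals
        (List.range M).foldl (fun g i => pvSet g i j (col2.getD i 0)) g) g with hG
      dsimp only
      have hcol : (List.range M).map (fun i => pvGet G i t) = pvColOf M g t := by
        rw [pvColOf]
        refine List.map_congr_left (fun i hi => ?_)
        rw [ihg i t, if_neg (by omega)]
      rw [hcol]
      have hc2 : List.replicate (M - ((pvColOf M g t).filter (fun v => v != 0)).length) 0 ++
            (pvColOf M g t).filter (fun v => v != 0) = pvSettleCol (pvColOf M g t) := by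
        simp [pvSettleCol, pvFilterNZ, pvColOf]
      rw [hc2]
      have hwc := pvWriteCol_char G t M (pvSettleCol (pvColOf M g t))
        (by rw [ihd.1]; exact hs.1)
        (fun x hx => by rw [ihd.2]; exact Nat.lt_of_lt_of_le (by omega) (hs.2 x hx))
      refine ⟨pvDims_trans ihd hwc.1, fun x y => ?_⟩
      rw [hwc.2 x y, ihg x y]
      by_cases h1 : x < M ∧ y = t
      · rw [if_pos h1, if_pos ⟨h1.1, by omega⟩, h1.2]
      · by_cases h2 : x < M ∧ y < t
        · rw [if_neg h1, if_pos h2, if_pos ⟨h2.1, by omega⟩]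
        · have hne : ¬(x < M ∧ y < t + 1) := by
            rintro ⟨ha, hb⟩
            rcases Nat.lt_or_ge y t with h | h
            · exact h2 ⟨ha, h⟩
            · exact h1 ⟨ha, by omega⟩
          rw [if_neg h1, if_neg h2, if_neg hne]
  exact main N le_rfl

theorem pvColOf_length (M : Nat) (g : List (List Int)) (j : Nat) :
    (pvColOf M g j).length = M := by
  simp [pvColOf]

theorem pvColOf_getD (M : Nat) (g : List (List Int)) (j x : Nat) (hx : x < M) :
    (pvColOf M g j).getD x 0 = pvGet g x j := by
  rw [pvColOf, List.getD_eq_getElem _ _ (by simpa using hx)]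
  simp

-- A's gravity: inner loop, outer loop, characterization via pvCStep

theorem pvGravInner_char (M N i : Nat) (g : List (List Int)) (hi : i < M - 1)
    (hs : pvShape M N g) :
    ∀ t, t ≤ N →
    pvDims g ((List.range t).foldl (fun g j =>
        if (pvGet g (M-i-2) j != 0) && (pvGet g (M-i-1) j == 0) then
          pvSet (pvSet g (M-i-2 + pvNumA g j (M-i-1) (i+1) 0) j (pvGet g (M-i-2) j)) (M-i-2) j 0
        else g) g) ∧
    ∀ x y, pvGet ((List.range t).foldl (fun g j =>
        if (pvGet g (M-i-2) j != 0) && (pvGet g (M-i-1) j == 0) then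
          pvSet (pvSet g (M-i-2 + pvNumA g j (M-i-1) (i+1) 0) j (pvGet g (M-i-2) j)) (M-i-2) j 0
        else g) g) x y
      = if x < M ∧ y < t then (pvCStep M i (pvColOf M g y)).getD x 0 else pvGet g x y := by
  intro t
  induction t with
  | zero => exact fun _ => ⟨pvDims_refl g, fun x y => by simp⟩
  | succ t ih =>
    intro ht
    obtain ⟨ihd, ihg⟩ := ih (by omega)
    rw [List.range_succ, List.foldl_append, List.foldl_cons, List.foldl_nil]
    set G := (List.range t).foldl (fun g j =>
        if (pvGet g (M-i-2) j != 0) && (pvGet g (M-i-1) j == 0) then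
          pvSet (pvSet g (M-i-2 + pvNumA g j (M-i-1) (i+1) 0) j (pvGet g (M-i-2) j)) (M-i-2) j 0
        else g) g with hG
    have hcd : ∀ x, x < M → pvGet G x t = (pvColOf M g t).getD x 0 := by
      intro x hx
      rw [ihg x t, if_neg (by omega), pvColOf_getD M g t x hx]
    have hGlen : g.length = G.length := (ihd.1).symm
    have hclen : (pvColOf M g t).length = M := pvColOf_length M g t
    have hcond : ((pvGet G (M-i-2) t != 0) && (pvGet G (M-i-1) t == 0))
        = (((pvColOf M g t).getD (M-i-2) 0 != 0) && ((pvColOf M g t).getD (M-i-1) 0 == 0)) := by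
      rw [hcd _ (by omega), hcd _ (by omega)]
    rw [hcond]
    by_cases hcb : (((pvColOf M g t).getD (M-i-2) 0 != 0)
        && ((pvColOf M g t).getD (M-i-1) 0 == 0)) = true
    · rw [if_pos hcb]
      have hnum : pvNumA G t (M-i-1) (i+1) 0 = pvNumC (pvColOf M g t) (M-i-1) (i+1) 0 :=
        pvNumA_eq_pvNumC G t (M-i-1) (i+1) (pvColOf M g t)
          (fun μ hμ => hcd (M-i-1+μ) (by omega)) 0
      rw [hnum, hcd (M-i-2) (by omega)]
      set ν := pvNumC (pvColOf M g t) (M-i-1) (i+1) 0 with hν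
      have hνle : ν ≤ i+1 := pvNumC_le (pvColOf M g t) (M-i-1) (i+1) 0 (by omega)
      have hin1 : M-i-2+ν < G.length := by
        rw [← hGlen]; have := hs.1; omega
      have hrow1 : t < (G.getD (M-i-2+ν) []).length := by
        rw [ihd.2]; have := hs.2 (M-i-2+ν) (by omega); omega
      have hin2 : M-i-2 < (pvSet G (M-i-2+ν) t ((pvColOf M g t).getD (M-i-2) 0)).length := by
        rw [pvSet_length, ← hGlen]; have := hs.1; omega
      have hrow2 : t < ((pvSet G (M-i-2+ν) t ((pvColOf M g t).getD (M-i-2) 0)).getD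
          (M-i-2) []).length := by
        rw [pvSet_rowlen, ihd.2]; have := hs.2 (M-i-2) (by omega); omega
      refine ⟨pvDims_trans ihd (pvDims_trans (pvDims_set G _ _ _) (pvDims_set _ _ _ _)),
        fun x y => ?_⟩
      rw [pvGet_pvSet]
      by_cases h1 : x = M-i-2 ∧ y = t
      · rw [if_pos ⟨h1.1, h1.2, hin2, hrow2⟩, if_pos ⟨by omega, by omega⟩, h1.2,
          pvCStep, if_pos hcb, ← hν, pvGetD_set]
        rw [if_pos ⟨h1.1, by rw [List.length_set, hclen]; omega⟩]
      · rw [if_neg (by tauto), pvGet_pvSet]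
        by_cases h2 : x = M-i-2+ν ∧ y = t
        · rw [if_pos ⟨h2.1, h2.2, hin1, hrow1⟩, if_pos ⟨by omega, by omega⟩, h2.2,
            pvCStep, if_pos hcb, ← hν, pvGetD_set]
          rw [if_neg (by rintro ⟨he, _⟩; exact h1 ⟨he, h2.2⟩), pvGetD_set]
          rw [if_pos ⟨h2.1, by rw [hclen]; omega⟩]
        · rw [if_neg (by tauto), ihg x y]
          by_cases h3 : x < M ∧ y = t
          · rw [if_neg (by omega), if_pos ⟨h3.1, by omega⟩, h3.2,
              pvCStep, if_pos hcb, ← hν, pvGetD_set]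
            rw [if_neg (by rintro ⟨he, _⟩; exact h1 ⟨he, h3.2⟩), pvGetD_set]
            rw [if_neg (by rintro ⟨he, _⟩; exact h2 ⟨he, h3.2⟩)]
            rw [pvColOf_getD M g t x h3.1]
          · by_cases h4 : x < M ∧ y < t
            · rw [if_pos h4, if_pos ⟨h4.1, by omega⟩]
            · have hne : ¬(x < M ∧ y < t + 1) := by
                rintro ⟨ha, hb⟩
                rcases Nat.lt_or_ge y t with h | h
                · exact h4 ⟨ha, h⟩
                · exact h3 ⟨ha, by omega⟩
              rw [if_neg h4, if_neg hne]
    · rw [if_neg hcb]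
      refine ⟨ihd, fun x y => ?_⟩
      rw [ihg x y]
      by_cases h1 : x < M ∧ y = t
      · rw [if_neg (by omega), if_pos ⟨h1.1, by omega⟩, h1.2, pvCStep, if_neg hcb,
          pvColOf_getD M g t x h1.1]
      · by_cases h2 : x < M ∧ y < t
        · rw [if_pos h2, if_pos ⟨h2.1, by omega⟩]
        · have hne : ¬(x < M ∧ y < t + 1) := by
            rintro ⟨ha, hb⟩
            rcases Nat.lt_or_ge y t with h | h
            · exact h2 ⟨ha, h⟩
            · exact h1 ⟨ha, by omega⟩
          rw [if_neg h2, if_neg hne]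

theorem pvCStep_length (M i : Nat) (c : List Int) : (pvCStep M i c).length = c.length := by
  rw [pvCStep]; split <;> simp

theorem pvPhase_length (M t : Nat) (c : List Int) :
    ((List.range t).foldl (fun c i => pvCStep M i c) c).length = c.length := by
  induction t with
  | zero => rfl
  | succ t ih => rw [List.range_succ, List.foldl_append, List.foldl_cons, List.foldl_nil,
      pvCStep_length, ih]

theorem pvGravA_char (M N : Nat) (g : List (List Int)) (hs : pvShape M N g) :
    pvDims g (pvGravA M N g) ∧
    ∀ x y, pvGet (pvGravA M N g) x y
      = if x < M ∧ y < N then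
          (((List.range (M-1)).foldl (fun c i => pvCStep M i c) (pvColOf M g y)).getD x 0)
        else pvGet g x y := by
  have main : ∀ t, t ≤ M - 1 →
      pvDims g ((List.range t).foldl (fun g i => (List.range N).foldl (fun g j =>
          if (pvGet g (M-i-2) j != 0) && (pvGet g (M-i-1) j == 0) then
            pvSet (pvSet g (M-i-2 + pvNumA g j (M-i-1) (i+1) 0) j (pvGet g (M-i-2) j)) (M-i-2) j 0
          else g) g) g) ∧
      ∀ x y, pvGet ((List.range t).foldl (fun g i => (List.range N).foldl (fun g j =>
          if (pvGet g (M-i-2) j != 0) && (pvGet g (M-i-1) j == 0) then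
            pvSet (pvSet g (M-i-2 + pvNumA g j (M-i-1) (i+1) 0) j (pvGet g (M-i-2) j)) (M-i-2) j 0
          else g) g) g) x y
        = if x < M ∧ y < N then
            (((List.range t).foldl (fun c i => pvCStep M i c) (pvColOf M g y)).getD x 0)
          else pvGet g x y := by
    intro t
    induction t with
    | zero =>
      refine fun _ => ⟨pvDims_refl g, fun x y => ?_⟩
      simp only [List.range_zero, List.foldl_nil]
      by_cases h : x < M ∧ y < N
      · rw [if_pos h, pvColOf_getD M g y x h.1]
      · rw [if_neg h]
    | succ t ih =>
      intro ht
      obtain ⟨ihd, ihg⟩ := ih (by omega)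
      rw [List.range_succ, List.foldl_append, List.foldl_cons, List.foldl_nil]
      set G := (List.range t).foldl (fun g i => (List.range N).foldl (fun g j =>
          if (pvGet g (M-i-2) j != 0) && (pvGet g (M-i-1) j == 0) then
            pvSet (pvSet g (M-i-2 + pvNumA g j (M-i-1) (i+1) 0) j (pvGet g (M-i-2) j)) (M-i-2) j 0
          else g) g) g with hG
      have hsG : pvShape M N G := pvShape_of_dims hs ihd
      obtain ⟨hid, hig⟩ := pvGravInner_char M N t G (by omega) hsG N le_rfl
      have hcolphase : ∀ y, y < N →
          pvColOf M G y = (List.range t).foldl (fun c i => pvCStep M i c) (pvColOf M g y) := by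
        intro y hy
        apply List.ext_getElem
        · rw [pvColOf_length, pvPhase_length, pvColOf_length]
        · intro x hx1 hx2
          rw [pvColOf_length] at hx1
          rw [← List.getD_eq_getElem _ 0 (by rwa [pvColOf_length]),
            ← List.getD_eq_getElem _ 0 hx2, pvColOf_getD M G y x hx1, ihg x y,
            if_pos ⟨hx1, hy⟩]
      refine ⟨pvDims_trans ihd hid, fun x y => ?_⟩
      rw [hig x y]
      by_cases h1 : x < M ∧ y < N
      · rw [if_pos h1, if_pos h1, hcolphase y h1.2, List.foldl_append,
          List.foldl_cons, List.foldl_nil]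
      · rw [if_neg h1, ihg x y, if_neg h1, if_neg h1]
  have h := main (M-1) le_rfl
  exact ⟨h.1, h.2⟩

-- the column mathematics: bottom-up sliding settles the column

theorem pvFilterNZ_mem {s : List Int} {v : Int} (h : v ∈ pvFilterNZ s) : v ≠ 0 := by
  rw [pvFilterNZ, List.mem_filter] at h
  simpa using h.2

theorem pvSettleCol_singleton (x : Int) : pvSettleCol [x] = [x] := by
  by_cases h : x = 0
  · subst h; rfl
  · have hx : (x != 0) = true := bne_iff_ne.mpr h
    simp [pvSettleCol, pvFilterNZ, List.filter_cons, hx]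

theorem pvSettleCol_zero_cons (s : List Int) : pvSettleCol (0 :: s) = 0 :: pvSettleCol s := by
  have hle := List.length_filter_le (fun v => v != 0) s
  simp only [pvSettleCol, pvFilterNZ, List.filter_cons]
  norm_num
  rw [show s.length + 1 - (List.filter (fun v => v != 0) s).length
      = (s.length - (List.filter (fun v => v != 0) s).length) + 1 by omega,
    List.replicate_succ]
  simp

theorem pvGetD_replicate_zero (z m : Nat) : (List.replicate z (0:Int)).getD m 0 = 0 := by
  simp only [List.getD, List.getElem?_replicate]
  split <;> rfl

theorem pvSet_replicate_last (z : Nat) (hz : 1 ≤ z) (a : Int) :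
    (List.replicate z (0:Int)).set (z-1) a = List.replicate (z-1) 0 ++ [a] := by
  conv_lhs => rw [show z = (z-1)+1 by omega, List.replicate_succ']
  rw [List.set_append_right _ _ (by simp), List.length_replicate,
    (by omega : z - 1 + 1 - 1 - (z - 1) = 0)]
  rfl

theorem pvCStep_take_settle (M k : Nat) (c : List Int) (hc : c.length = M)
    (hk1 : 1 ≤ k) (hk : k ≤ M - 1) :
    pvCStep M (M-1-k) (c.take k ++ pvSettleCol (c.drop k))
      = c.take (k-1) ++ pvSettleCol (c.drop (k-1)) := by
  have hM : 2 ≤ M := by omega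
  have hr2 : M-(M-1-k)-2 = k-1 := by omega
  have hr1 : M-(M-1-k)-1 = k := by omega
  have hlim : (M-1-k)+1 = M-k := by omega
  have hs'len : (c.drop k).length = M - k := by rw [List.length_drop, hc]
  have hfle := List.length_filter_le (fun v => v != 0) (c.drop k)
  have htake : (c.take k).length = k := by rw [List.length_take]; omega
  have hdropk : c.drop (k-1) = c.getD (k-1) 0 :: c.drop k := by
    have h1 : k-1 < c.length := by omega
    have h2 := List.drop_eq_getElem_cons h1
    rw [show k-1+1 = k by omega] at h2
    rw [h2, List.getD_eq_getElem c 0 h1]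
  have hu1 : (c.take k ++ pvSettleCol (c.drop k)).getD (k-1) 0 = c.getD (k-1) 0 := by
    rw [List.getD_append _ _ _ _ (by rw [htake]; omega),
      List.getD_eq_getElem _ _ (by rw [htake]; omega),
      List.getD_eq_getElem c 0 (by omega), List.getElem_take]
  have hu2 : (c.take k ++ pvSettleCol (c.drop k)).getD k 0
      = (pvSettleCol (c.drop k)).getD 0 0 := by
    rw [List.getD_append_right _ _ _ _ (by rw [htake]), htake, Nat.sub_self]
  have htk : c.take k = c.take (k-1) ++ [c.getD (k-1) 0] := by
    have h2 := List.take_add_one (l := c) (i := k-1)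
    rw [show k-1+1 = k by omega] at h2
    rw [h2, List.getElem?_eq_getElem (by omega), List.getD_eq_getElem c 0 (by omega)]
    rfl
  obtain ⟨f, hf⟩ : ∃ f, f = pvFilterNZ (c.drop k) := ⟨_, rfl⟩
  obtain ⟨z, hz⟩ : ∃ z, z = (c.drop k).length - f.length := ⟨_, rfl⟩
  have hflen : f.length ≤ (c.drop k).length := by rw [hf]; exact hfle
  have hsettle : pvSettleCol (c.drop k) = List.replicate z 0 ++ f := by
    rw [hz, hf]; rfl
  rw [pvCStep, hr2, hr1, hlim, hu1, hu2]
  by_cases ha : c.getD (k-1) 0 = 0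
  · -- the moving cell is itself zero: nothing happens
    have hcondF : ((c.getD (k-1) 0 != 0) && ((pvSettleCol (c.drop k)).getD 0 0 == 0)) = false := by
      rw [ha]
      rfl
    rw [if_neg (by rw [hcondF]; simp)]
    rw [hdropk, ha, pvSettleCol_zero_cons, htk, ha]
    simp
  · by_cases hh : (pvSettleCol (c.drop k)).getD 0 0 = 0
    · -- a zero below: the cell falls
      have hcondT : ((c.getD (k-1) 0 != 0) && ((pvSettleCol (c.drop k)).getD 0 0 == 0)) = true := by
        rw [Bool.and_eq_true]
        exact ⟨bne_iff_ne.mpr ha, beq_iff_eq.mpr hh⟩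
      rw [if_pos hcondT]
      have hz1 : 1 ≤ z := by
        by_contra h0
        have hfs : f = c.drop k := by
          rw [hf]
          exact List.Sublist.eq_of_length (List.filter_sublist) (by rw [← hf]; omega)
        have hfne : f ≠ [] := by
          rw [hfs]
          intro he
          rw [he] at hs'len
          simp at hs'len
          omega
        obtain ⟨v, vs, hv⟩ := List.exists_cons_of_ne_nil hfne
        have hv0 : v ≠ 0 := pvFilterNZ_mem (by rw [← hf, hv]; exact List.mem_cons_self)
        rw [hsettle, show z = 0 by omega, List.replicate_zero, List.nil_append, hv] at hh
        simp [List.getD] at hh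
        exact hv0 hh
      have hzlim : z ≤ M - k := by rw [hs'len] at hz; omega
      have hnum : pvNumC (c.take k ++ pvSettleCol (c.drop k)) k (M-k) 0 = z := by
        apply pvNumC_first
        · rcases Nat.lt_or_ge z (M-k) with hlt | hge
          · right
            rw [List.getD_append_right _ _ _ _ (by rw [htake]; omega), htake,
              show k+z-k = z by omega, hsettle,
              List.getD_append_right _ _ _ _ (by rw [List.length_replicate]),
              List.length_replicate, Nat.sub_self]
            have hfne : f ≠ [] := by
              have hl : f.length ≠ 0 := by rw [hs'len] at hz; omega
              exact fun he => hl (by rw [he]; rfl)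
            obtain ⟨v, vs, hv⟩ := List.exists_cons_of_ne_nil hfne
            rw [hv]
            exact pvFilterNZ_mem (by rw [← hf, hv]; exact List.mem_cons_self)
          · left; omega
        · intro μ hμ
          refine ⟨by omega, ?_⟩
          rw [List.getD_append_right _ _ _ _ (by rw [htake]; omega), htake,
            show k+μ-k = μ by omega, hsettle,
            List.getD_append _ _ _ _ (by rw [List.length_replicate]; omega)]
          exact pvGetD_replicate_zero _ _
      rw [hnum]
      have hset1 : (c.take k ++ pvSettleCol (c.drop k)).set (k-1+z) (c.getD (k-1) 0)
          = c.take k ++ (List.replicate (z-1) 0 ++ (c.getD (k-1) 0 :: f)) := by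
        rw [List.set_append_right _ _ (by rw [htake]; omega), htake,
          show k-1+z-k = z-1 by omega,
          hsettle, List.set_append_left _ _ (by rw [List.length_replicate]; omega),
          pvSet_replicate_last z hz1]
        simp
      rw [hset1, List.set_append_left _ _ (by rw [htake]; omega), htk,
        List.set_append_right _ _ (by rw [List.length_take]; omega)]
      have hz2 : pvSettleCol (c.drop (k-1)) = List.replicate z 0 ++ (c.getD (k-1) 0 :: f) := by
        rw [hdropk, pvSettleCol, pvFilterNZ, List.filter_cons, if_pos (bne_iff_ne.mpr ha)]
        rw [← pvFilterNZ, ← hf]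
        congr 2
        simp only [List.length_cons]
        omega
      rw [hz2]
      have hsetl : (List.take (k-1) c).length = k-1 := by rw [List.length_take]; omega
      rw [hsetl, Nat.sub_self]
      show c.take (k-1) ++ [(0:Int)] ++ (List.replicate (z-1) 0 ++ (c.getD (k-1) 0 :: f))
        = c.take (k-1) ++ (List.replicate z 0 ++ (c.getD (k-1) 0 :: f))
      rw [List.append_assoc]
      congr 1
      rw [← List.append_assoc]
      congr 1
      rw [show z = (z-1)+1 by omega, List.replicate_succ]
      rfl
    · -- everything below is solid: already settled
      have hcondF : ((c.getD (k-1) 0 != 0) && ((pvSettleCol (c.drop k)).getD 0 0 == 0)) = false := by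
        rw [Bool.and_eq_false_iff]
        right
        exact beq_eq_false_iff_ne.mpr hh
      rw [if_neg (by rw [hcondF]; simp)]
      have hz0 : z = 0 := by
        by_contra h0
        apply hh
        rw [hsettle, List.getD_append _ _ _ _ (by rw [List.length_replicate]; omega)]
        exact pvGetD_replicate_zero _ _
      have hfs : f = c.drop k := by
        rw [hf]
        exact List.Sublist.eq_of_length (List.filter_sublist) (by rw [← hf]; omega)
      have hsettle1 : pvSettleCol (c.drop k) = c.drop k := by
        rw [hsettle, hz0, List.replicate_zero, List.nil_append, hfs]
      have hsettle2 : pvSettleCol (c.getD (k-1) 0 :: c.drop k) = c.getD (k-1) 0 :: c.drop k := by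
        have hfc : pvFilterNZ (c.getD (k-1) 0 :: c.drop k) = c.getD (k-1) 0 :: pvFilterNZ (c.drop k) := by
          rw [pvFilterNZ, List.filter_cons, if_pos (bne_iff_ne.mpr ha)]
          rfl
        rw [pvSettleCol, hfc, ← hf, hfs]
        simp
      rw [hdropk, hsettle2, hsettle1, htk]
      simp

theorem pvPhase_settle (M : Nat) (c : List Int) (hc : c.length = M) :
    (List.range (M-1)).foldl (fun c i => pvCStep M i c) c = pvSettleCol c := by
  rcases Nat.eq_zero_or_pos M with hM0 | hMpos
  · have hcnil : c = [] := List.eq_nil_of_length_eq_zero (by omega)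
    subst hcnil
    rw [hM0]
    rfl
  · have inv : ∀ t, t ≤ M-1 →
        (List.range t).foldl (fun c i => pvCStep M i c) c
          = c.take (M-1-t) ++ pvSettleCol (c.drop (M-1-t)) := by
      intro t
      induction t with
      | zero =>
        intro _
        have hlast : c.drop (M-1) = [c.getD (M-1) 0] := by
          have h1 : M-1 < c.length := by omega
          rw [List.drop_eq_getElem_cons h1, List.getD_eq_getElem c 0 h1]
          have : c.drop (M-1+1) = [] := by
            apply List.drop_eq_nil_of_le
            omega
          rw [this]
        simp only [List.range_zero, List.foldl_nil, Nat.sub_zero]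
        rw [hlast, pvSettleCol_singleton, ← hlast, List.take_append_drop]
      | succ t ih =>
        intro ht
        rw [List.range_succ, List.foldl_append, List.foldl_cons, List.foldl_nil,
          ih (by omega)]
        have hk1 : 1 ≤ M-1-t := by omega
        have hk2 : M-1-t ≤ M-1 := by omega
        have hstep := pvCStep_take_settle M (M-1-t) c hc hk1 hk2
        rw [show M-1-(M-1-t) = t by omega] at hstep
        rw [hstep, show M-1-t-1 = M-1-(t+1) by omega]
    have hfin := inv (M-1) le_rfl
    rw [Nat.sub_self] at hfin
    rw [hfin]
    simp

-- the round and the loop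

theorem pvLoop_eq (M N : Nat) :
    ∀ fuel g, (2 ≤ M → 2 ≤ N → pvShape M N g) → pvLoopA M N fuel g = pvLoopB M N fuel g := by
  intro fuel
  induction fuel with
  | zero => intro g _; rfl
  | succ fuel ih =>
    intro g hsh
    rw [pvLoopA, pvLoopB, pvMarkA_eq]
    cases hemp : (pvCorners M N g).isEmpty with
    | true =>
      have hnil : pvCorners M N g = [] := List.isEmpty_iff.mp hemp
      rw [hnil]
      rfl
    | false =>
      obtain ⟨hM2, hN2⟩ := pvCorners_nonempty (M := M) (N := N) (g := g) (by rw [hemp]; simp)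
      have hs : pvShape M N g := hsh hM2 hN2
      have hs' : pvShape M N (pvClear g (pvCorners M N g)) :=
        pvShape_of_dims hs (pvDims_clear g _)
      obtain ⟨hdA, hgA⟩ := pvGravA_char M N _ hs'
      obtain ⟨hdB, hgB⟩ := pvSettle_char M N _ hs'
      have hgrids : pvSettle M N (pvClear g (pvCorners M N g))
          = pvGravA M N (pvClear g (pvCorners M N g)) := by
        refine (pvGrid_ext ⟨by rw [hdA.1, hdB.1], fun x => by rw [hdA.2, hdB.2]⟩
          (fun x y => ?_)).symm
        rw [hgA x y, hgB x y]
        by_cases h : x < M ∧ y < N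
        · rw [if_pos h, if_pos h,
            pvPhase_settle M _ (pvColOf_length M _ y)]
        · rw [if_neg h, if_neg h]
      show pvLoopA M N fuel (pvGravA M N (pvClear g (pvCorners M N g)))
        = pvLoopB M N fuel (pvSettle M N (pvClear g (pvCorners M N g)))
      rw [hgrids]
      exact ih _ (fun _ _ => pvShape_of_dims hs' hdA)



-- ===== VERDICT (by name: the statement is the Claim_ definition above) =====
theorem solution_spec : Claim_equal_solution := by
  unfold Claim_equal_solution Spec_solution
  intro m n board _ hpre
  show pvLoopA m.toNat n.toNat (m.toNat * n.toNat + 1) (pvToGrid board)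
    = pvLoopB m.toNat n.toNat (m.toNat * n.toNat + 1) (pvToGrid board)
  apply pvLoop_eq
  intro hM2 hN2
  obtain ⟨hlen, hrows⟩ := hpre (by omega) (by omega)
  constructor
  · rw [pvToGrid, List.length_map]
    omega
  · intro i hi
    have hib : i < board.length := by omega
    have hrow : (pvToGrid board).getD i [] = board[i].toList.map (fun c => (c.toNat : Int)) := by
      rw [pvToGrid, List.getD_eq_getElem _ _ (by rwa [List.length_map]), List.getElem_map]
    rw [hrow, List.length_map]
    have hmem : board[i] ∈ board.take m.toNat := by
      have h1 : i < (board.take m.toNat).length := by rw [List.length_take]; omega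
      have := List.getElem_mem h1
      rwa [List.getElem_take] at this
    have := hrows board[i] hmem
    have hsl : board[i].length = board[i].toList.length := rfl
    omega
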